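-- pv_equiv track=rewrite | github.com/Nghiep16052005/learning_python | ham/luyen_tap_viet_ham_quan_trong.py | check_last_digit_max
-- ===== SOURCE A (Python) =====
-- def check_last_digit_max(n):
--     tmp = n%10 # lay chu so tan cung de kiem tra xem co so nao lon hon so nay khong
--     n //= 10
--     while n != 0:
--         if tmp < n %10 :
--             return 0
--         n //=10
--     return 1
-- ===== SOURCE B (Python) =====
-- def check_last_digit_max(n):
--     def max_digit(m):
--         if m < 10:
--             return m
--         return max(m % 10, max_digit(m // 10))
--     return 1 if n % 10 == max_digit(n) else 0
-- ===== Notes on version B (the rewrite author's own statement) =====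
-- stated objective: alternative
-- what changed: Replaces A's early-exit while-loop scan over the remaining digits with a recursive max-digit computation over all digits and a single equality test; Pre_ excludes negative n with n % 10 == 9, on which A's n //= 10 loop gets stuck at -1 and never returns (B returns 0 there)
-- outside the precondition, e.g. on check_last_digit_max(-1): A does not finish within the time limit, B returns 0; on check_last_digit_max(-11): A does not finish within the time limit, B returns 0
import Mathlib
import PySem

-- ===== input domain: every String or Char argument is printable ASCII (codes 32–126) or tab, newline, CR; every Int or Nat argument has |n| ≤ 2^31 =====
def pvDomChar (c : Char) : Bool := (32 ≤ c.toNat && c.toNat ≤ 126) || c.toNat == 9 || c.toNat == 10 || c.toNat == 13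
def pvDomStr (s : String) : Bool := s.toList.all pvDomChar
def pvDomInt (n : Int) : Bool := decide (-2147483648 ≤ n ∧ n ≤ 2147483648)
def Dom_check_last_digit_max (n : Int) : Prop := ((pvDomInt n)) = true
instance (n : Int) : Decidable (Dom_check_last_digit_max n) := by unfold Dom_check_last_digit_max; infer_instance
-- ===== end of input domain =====

-- B replaces A's early-exit digit scan by a recursive max-digit computation plus one equality test (alternative decomposition, same cost).

-- ===== PORT A =====
-- the while-loop of A; the fuel only makes the loop total in Lean (the lemmas show it never runs out on Pre_ inputs)
def pvLoopA (fuel : Nat) (tmp m : Int) : Int :=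
  match fuel with
  | 0 => 0
  | f + 1 =>
    if m = 0 then 1
    else if tmp < PySem.Int.mod m 10 then 0
    else pvLoopA f tmp (PySem.Int.floordiv m 10)

def check_last_digit_max (n : Int) : Int :=
  pvLoopA (n.natAbs + 1) (PySem.Int.mod n 10) (PySem.Int.floordiv n 10)

-- ===== PORT B =====
def pvMaxDigit (m : Int) : Int :=
  if m < 10 then m
  else max (PySem.Int.mod m 10) (pvMaxDigit (PySem.Int.floordiv m 10))
termination_by m.toNat
decreasing_by
  rw [PySem.Int.floordiv_eq_ediv_of_pos (by norm_num)]
  omega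

def check_last_digit_max_alt (n : Int) : Int :=
  if PySem.Int.mod n 10 = pvMaxDigit n then 1 else 0

-- ===== PRECONDITION & SPEC =====
-- Pre_ excludes exactly the inputs on which A never returns: for negative n with n % 10 == 9,
-- A's `n //= 10` loop gets stuck at -1 and its digit 9 never exceeds tmp, so the while-loop runs forever.
def Pre_check_last_digit_max (n : Int) : Prop := ¬ (n < 0 ∧ PySem.Int.mod n 10 = 9)
instance (n : Int) : Decidable (Pre_check_last_digit_max n) := by unfold Pre_check_last_digit_max; infer_instance
def pvWitness_check_last_digit_max : Int := 523

def Spec_check_last_digit_max (n : Int) (out : Int) : Prop := out = check_last_digit_max_alt n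
instance (n : Int) (out : Int) : Decidable (Spec_check_last_digit_max n out) := by unfold Spec_check_last_digit_max; infer_instance

-- ===== CLAIM (what is proved, stated in full; the proofs are below) =====
def Claim_equal_check_last_digit_max : Prop := ∀ (n : Int), Dom_check_last_digit_max n → Pre_check_last_digit_max n → Spec_check_last_digit_max n (check_last_digit_max n)

-- ===== LEMMAS AND PROOFS =====
theorem pv_md (n : Int) : PySem.Int.mod n 10 = n % 10 :=
  PySem.Int.mod_eq_emod_of_pos (by norm_num)

theorem pv_fd (n : Int) : PySem.Int.floordiv n 10 = n / 10 :=
  PySem.Int.floordiv_eq_ediv_of_pos (by norm_num)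

theorem pvMaxDigit_lt (n : Int) (h : n < 10) : pvMaxDigit n = n := by
  rw [pvMaxDigit, if_pos h]

theorem pvMaxDigit_ge (n : Int) (h : 10 ≤ n) :
    pvMaxDigit n = max (n % 10) (pvMaxDigit (n / 10)) := by
  rw [pvMaxDigit, if_neg (by omega), pv_md, pv_fd]

theorem pvLoopA_nonneg (fuel : Nat) : ∀ (tmp m : Int), 0 ≤ m → 0 ≤ tmp → m < (fuel : Int) →
    pvLoopA fuel tmp m = if m = 0 then 1 else if pvMaxDigit m ≤ tmp then 1 else 0 := by
  induction fuel with
  | zero => intro tmp m _ _ h; omega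
  | succ f ih =>
    intro tmp m hm ht hf
    by_cases h0 : m = 0
    · subst h0; simp [pvLoopA]
    · rw [pvLoopA, if_neg h0, pv_md, pv_fd, if_neg h0]
      by_cases hlt : m < 10
      · have hd : m / 10 = 0 := by omega
        have hmd : m % 10 = m := by omega
        rw [hd, hmd, pvMaxDigit_lt m hlt,
          ih tmp 0 (by omega) ht (by omega), if_pos rfl]
        split_ifs <;> omega
      · rw [pvMaxDigit_ge m (by omega),
          ih tmp (m / 10) (by omega) ht (by omega),
          if_neg (show ¬ (m / 10 = 0) by omega)]
        rcases le_total (pvMaxDigit (m / 10)) (m % 10) with h | h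
        · rw [max_eq_left h]; split_ifs <;> omega
        · rw [max_eq_right h]; split_ifs <;> omega

theorem pvLoopA_neg (fuel : Nat) : ∀ (tmp m : Int), m < 0 → 0 ≤ tmp → tmp < 9 →
    m.natAbs ≤ fuel → pvLoopA fuel tmp m = 0 := by
  induction fuel with
  | zero => intro tmp m hm _ _ h; omega
  | succ f ih =>
    intro tmp m hm ht h9 hf
    rw [pvLoopA, if_neg (by omega), pv_md, pv_fd]
    by_cases hlt : tmp < m % 10
    · rw [if_pos hlt]
    · rw [if_neg hlt]
      exact ih tmp (m / 10) (by omega) ht h9 (by omega)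

-- ===== VERDICT (by name: the statement is the Claim_ definition above) =====
theorem check_last_digit_max_spec : Claim_equal_check_last_digit_max := by
  intro n _ hpre
  unfold Spec_check_last_digit_max check_last_digit_max check_last_digit_max_alt
  unfold Pre_check_last_digit_max at hpre
  rw [pv_md n, pv_fd n]
  rw [pv_md n] at hpre
  by_cases hn : 0 ≤ n
  · rw [pvLoopA_nonneg (n.natAbs + 1) (n % 10) (n / 10) (by omega) (by omega) (by omega)]
    by_cases h10 : n < 10
    · rw [if_pos (show n / 10 = 0 by omega), pvMaxDigit_lt n h10,
        if_pos (show n % 10 = n by omega)]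
    · rw [if_neg (show ¬ n / 10 = 0 by omega), pvMaxDigit_ge n (by omega)]
      rcases le_total (pvMaxDigit (n / 10)) (n % 10) with h | h
      · rw [max_eq_left h]; split_ifs <;> omega
      · rw [max_eq_right h]; split_ifs <;> omega
  · rw [pvLoopA_neg (n.natAbs + 1) (n % 10) (n / 10) (by omega) (by omega) (by omega) (by omega)]
    rw [pvMaxDigit_lt n (by omega), if_neg (by omega)]
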